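-- pv_equiv track=rewrite | github.com/yeeun-uwu/BaekjoonRepo | 백준/Gold/30678. 별 안에 별 안에 별 찍기/별 안에 별 안에 별 찍기.py | is_star_or_space
-- ===== SOURCE A (Python) =====
-- star = [
--     [0, 0, 1, 0, 0],
--     [0, 0, 1, 0, 0],
--     [1, 1, 1, 1, 1],
--     [0, 1, 1, 1, 0],
--     [0, 1, 0, 1, 0]
-- ]
--
-- def is_star_or_space(x, y, l):
--     dx = (x // l) % 5
--     dy = (y // l) % 5
--
--     if l == 1:
--         return star[dy][dx] == 1
--
--     if star[dy][dx]: #1이면 별 그려야댐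
--         return is_star_or_space(x, y, l//5)
--
--     return False
-- ===== SOURCE B (Python) =====
-- star = [
--     [0, 0, 1, 0, 0],
--     [0, 0, 1, 0, 0],
--     [1, 1, 1, 1, 1],
--     [0, 1, 1, 1, 0],
--     [0, 1, 0, 1, 0]
-- ]
--
-- def is_star_or_space(x, y, l):
--     # Collect the chain of scales l, l//5, ... first (pure arithmetic),
--     # then test the star cells bottom-up (finest scale first): the pixel
--     # is a star iff every scale's cell is a star.
--     scales = []
--     while l > 1:
--         scales.append(l)
--         l //= 5
--     if l == 1:
--         scales.append(1)
--     for d in reversed(scales):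
--         if star[(y // d) % 5][(x // d) % 5] != 1:
--             return False
--     return True
-- ===== Notes on version B (the rewrite author's own statement) =====
-- stated objective: alternative
-- what changed: B first collects the chain of scales l, l//5, ... with a plain arithmetic loop and then tests the star cells bottom-up (finest scale first) over the reversed chain, instead of A's top-down recursion that interleaves cell test and descent; Pre_ excludes only scale 0 (ZeroDivisionError), star-covered descents that die (ZeroDivisionError/RecursionError), and negative scales, where A's False is an artefact of recursing on a malformed scale.
-- outside the precondition, e.g. on is_star_or_space(0, 0, -1): A returns False, B returns True
import Mathlib
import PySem

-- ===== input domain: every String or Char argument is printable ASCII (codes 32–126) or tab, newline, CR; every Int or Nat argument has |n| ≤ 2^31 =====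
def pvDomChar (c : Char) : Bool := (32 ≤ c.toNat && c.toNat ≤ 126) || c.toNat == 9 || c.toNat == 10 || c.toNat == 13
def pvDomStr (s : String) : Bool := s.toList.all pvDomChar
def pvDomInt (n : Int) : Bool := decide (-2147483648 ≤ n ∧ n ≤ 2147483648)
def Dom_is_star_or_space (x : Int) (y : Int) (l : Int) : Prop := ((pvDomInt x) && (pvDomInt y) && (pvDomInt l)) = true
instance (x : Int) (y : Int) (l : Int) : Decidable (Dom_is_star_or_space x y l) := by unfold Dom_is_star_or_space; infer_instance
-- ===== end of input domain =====

-- B collects the chain of scales l, l//5, … with a plain loop, then tests the star cells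
-- bottom-up over the reversed chain, instead of A's top-down recursion interleaving test
-- and descent (objective: alternative).

-- ===== PORT A =====
-- the module-level `star` table
def starTable : List (List Int) :=
  [[0, 0, 1, 0, 0],
   [0, 0, 1, 0, 0],
   [1, 1, 1, 1, 1],
   [0, 1, 1, 1, 0],
   [0, 1, 0, 1, 0]]

-- star[dy][dx]; both indices are always `… % 5` values in [0,5), so pyGet? is never none
-- (Python never raises here) and the getD defaults are unreachable.
def starAt (dy dx : Int) : Int :=
  ((PySem.List.pyGet? starTable dy).getD []) |> fun row => (PySem.List.pyGet? row dx).getD 0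

def is_star_or_space (x : Int) (y : Int) (l : Int) : Bool :=
  let dx := PySem.Int.mod (PySem.Int.floordiv x l) 5
  let dy := PySem.Int.mod (PySem.Int.floordiv y l) 5
  if l == 1 then starAt dy dx == 1
  else if starAt dy dx == 0 then false           -- Python: `if star[dy][dx]:` falls through to `return False`
  else if _h : l ≤ 0 then false                  -- totality guard: Python raises (l = 0) or diverges (l < 0) here
  else is_star_or_space x y (PySem.Int.floordiv l 5)
termination_by l.toNat
decreasing_by
  simp only [PySem.Int.floordiv_eq_ediv_of_pos (by omega : (0:Int) < 5)]
  omega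

-- ===== PORT B =====
-- B's first loop: `while l > 1: scales.append(l); l //= 5`; returns (scales, final l)
def buildScales (l : Int) (scales : List Int) : List Int × Int :=
  if _h : 1 < l then buildScales (PySem.Int.floordiv l 5) (scales ++ [l]) else (scales, l)
termination_by l.toNat
decreasing_by
  simp only [PySem.Int.floordiv_eq_ediv_of_pos (by omega : (0:Int) < 5)]
  omega

-- B's second loop: `for d in reversed(scales): if cell != 1: return False` then `return True`
def checkScales (x : Int) (y : Int) : List Int → Bool
  | [] => true
  | d :: rest =>
    if starAt (PySem.Int.mod (PySem.Int.floordiv y d) 5) (PySem.Int.mod (PySem.Int.floordiv x d) 5) != 1 then false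
    else checkScales x y rest

def is_star_or_space_alt (x : Int) (y : Int) (l : Int) : Bool :=
  let (scales, lf) := buildScales l []
  let scales := if lf == 1 then scales ++ [1] else scales
  checkScales x y scales.reverse

-- ===== PRECONDITION & SPEC =====
-- the (dy, dx) positions of the empty cells of the star pattern (a plain data table)
def zeroCells : List (Int × Int) :=
  [(0,0),(0,1),(0,3),(0,4),(1,0),(1,1),(1,3),(1,4),(3,0),(3,4),(4,0),(4,2),(4,4)]

-- Pre_ is exactly where A's descent returns on a positive scale: either the //5-descent of l
-- reaches exactly 1, i.e. the leading base-5 digit of l is 1 (l < 2·5^⌊log₅ l⌋ — every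
-- positive power of 5, the intended input, qualifies), or some consulted cell of the star
-- pattern is empty (A then returns False before the descent dies); the existential's bound
-- i ≤ ⌊log₅ l⌋ is forced by its own conjunct 2·5^i ≤ l, so nothing is capped.  Excluded are
-- only inputs where A raises (ZeroDivisionError at scale 0 or when a star-covered descent
-- reaches 0, RecursionError on negative scales) and the negative scales on which A's False
-- is an artefact of recursing on a malformed scale.
def Pre_is_star_or_space (x : Int) (y : Int) (l : Int) : Prop :=
  (1 ≤ l ∧ l < 2 * 5 ^ Nat.log 5 l.toNat) ∨
  (2 ≤ l ∧ ∃ i ≤ Nat.log 5 l.toNat, 2 * (5:Int) ^ i ≤ l ∧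
    (PySem.Int.mod (PySem.Int.floordiv y (PySem.Int.floordiv l (5 ^ i))) 5,
     PySem.Int.mod (PySem.Int.floordiv x (PySem.Int.floordiv l (5 ^ i))) 5) ∈ zeroCells)
instance (x : Int) (y : Int) (l : Int) : Decidable (Pre_is_star_or_space x y l) := by unfold Pre_is_star_or_space; infer_instance
def pvWitness_is_star_or_space : Int × Int × Int := (2, 2, 7)

def Spec_is_star_or_space (x : Int) (y : Int) (l : Int) (out : Bool) : Prop := out = is_star_or_space_alt x y l
instance (x : Int) (y : Int) (l : Int) (out : Bool) : Decidable (Spec_is_star_or_space x y l out) := by unfold Spec_is_star_or_space; infer_instance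

-- ===== CLAIM (what is proved, stated in full; the proofs are below) =====
def Claim_equal_is_star_or_space : Prop := ∀ (x : Int) (y : Int) (l : Int), Dom_is_star_or_space x y l → Pre_is_star_or_space x y l → Spec_is_star_or_space x y l (is_star_or_space x y l)

-- ===== LEMMAS AND PROOFS =====

-- the cell both programs consult at scale d
def cellB (x y d : Int) : Bool :=
  starAt (PySem.Int.mod (PySem.Int.floordiv y d) 5) (PySem.Int.mod (PySem.Int.floordiv x d) 5) == 1

-- the chain of scales above 1: l, l//5, …, (j of them)
def scalesAux : Nat → Int → List Int
  | 0, _ => []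
  | j + 1, l => l :: scalesAux j (PySem.Int.floordiv l 5)

-- every consulted table entry is 0 or 1
lemma star01 (a b : Int) (ha0 : 0 ≤ a) (ha5 : a < 5) (hb0 : 0 ≤ b) (hb5 : b < 5) :
    starAt a b = 0 ∨ starAt a b = 1 := by
  interval_cases a <;> interval_cases b <;>
    simp [starAt, PySem.List.pyGet?, PySem.List.pyIdx?, starTable]

lemma starMod (a b : Int) :
    starAt (PySem.Int.mod a 5) (PySem.Int.mod b 5) = 0 ∨ starAt (PySem.Int.mod a 5) (PySem.Int.mod b 5) = 1 :=
  star01 _ _ (PySem.Int.mod_nonneg a (by norm_num)) (PySem.Int.mod_lt a (by norm_num))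
    (PySem.Int.mod_nonneg b (by norm_num)) (PySem.Int.mod_lt b (by norm_num))

-- the //5-step keeps the bracket one power lower
lemma step_bounds {j : Nat} {l : Int} (h1 : (5:Int) ^ (j + 1) ≤ l) (h2 : l < 2 * 5 ^ (j + 1)) :
    (5:Int) ^ j ≤ PySem.Int.floordiv l 5 ∧ PySem.Int.floordiv l 5 < 2 * 5 ^ j := by
  constructor
  · rw [PySem.Int.le_floordiv_iff_mul_le (by norm_num : (0:Int) < 5)]
    calc (5:Int) ^ j * 5 = 5 ^ (j + 1) := (pow_succ 5 j).symm
      _ ≤ l := h1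
  · rw [PySem.Int.floordiv_lt_iff_lt_mul (by norm_num : (0:Int) < 5)]
    calc l < 2 * 5 ^ (j + 1) := h2
      _ = 2 * 5 ^ j * 5 := by ring

lemma A_char (j : Nat) : ∀ (x y l : Int), (5:Int) ^ j ≤ l → l < 2 * 5 ^ j →
    is_star_or_space x y l = (scalesAux j l ++ [1]).all (cellB x y) := by
  induction j with
  | zero =>
    intro x y l h1 h2
    have hl : l = 1 := by simp only [pow_zero] at h1 h2; omega
    subst hl
    rw [is_star_or_space]
    simp [scalesAux, cellB]
  | succ j ih =>
    intro x y l h1 h2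
    have h5 : (5:Int) ≤ l := le_trans (by calc (5:Int) = 5 ^ 1 := (pow_one 5).symm
      _ ≤ 5 ^ (j + 1) := pow_le_pow_right₀ (by norm_num) (by omega)) h1
    rw [is_star_or_space]
    have hne : (l == 1) = false := by simp; omega
    rw [dif_neg (by omega : ¬ l ≤ 0)]
    obtain ⟨hb1, hb2⟩ := step_bounds h1 h2
    simp only [hne, Bool.false_eq_true, if_false, ih x y _ hb1 hb2]
    rw [show scalesAux (j + 1) l = l :: scalesAux j (PySem.Int.floordiv l 5) from rfl,
        List.cons_append, List.all_cons]
    rcases starMod (PySem.Int.floordiv y l) (PySem.Int.floordiv x l) with h | h <;>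
      simp only [PySem.Int.mod_eq_emod_of_pos (by norm_num : (0:Int) < 5)] at h <;>
      simp [h, cellB]

lemma buildScales_char (j : Nat) : ∀ (l : Int) (acc : List Int), (5:Int) ^ j ≤ l → l < 2 * 5 ^ j →
    buildScales l acc = (acc ++ scalesAux j l, 1) := by
  induction j with
  | zero =>
    intro l acc h1 h2
    have hl : l = 1 := by simp only [pow_zero] at h1 h2; omega
    subst hl
    rw [buildScales]
    simp [scalesAux]
  | succ j ih =>
    intro l acc h1 h2
    have h5 : (5:Int) ≤ l := le_trans (by calc (5:Int) = 5 ^ 1 := (pow_one 5).symm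
      _ ≤ 5 ^ (j + 1) := pow_le_pow_right₀ (by norm_num) (by omega)) h1
    rw [buildScales, dif_pos (by omega : (1:Int) < l)]
    obtain ⟨hb1, hb2⟩ := step_bounds h1 h2
    rw [ih _ _ hb1 hb2,
        show scalesAux (j + 1) l = l :: scalesAux j (PySem.Int.floordiv l 5) from rfl]
    simp

lemma checkScales_all (x y : Int) (ds : List Int) : checkScales x y ds = ds.all (cellB x y) := by
  induction ds with
  | nil => rfl
  | cons d rest ih =>
    rw [checkScales, List.all_cons]
    cases hc : cellB x y d
    · rw [if_pos (by simp [cellB] at hc ⊢; exact hc)]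
      simp
    · rw [if_neg (by simp [cellB] at hc ⊢; exact hc)]
      simp [ih]

-- the star pattern is empty exactly at the zeroCells positions (within the consulted range)
lemma zeroCells_starAt : ∀ p ∈ zeroCells, starAt p.1 p.2 = 0 := by decide

lemma fd_comp (l : Int) (i : Nat) :
    PySem.Int.floordiv (PySem.Int.floordiv l 5) ((5:Int) ^ i) = PySem.Int.floordiv l ((5:Int) ^ (i + 1)) := by
  rw [PySem.Int.floordiv_eq_ediv_of_pos (by norm_num : (0:Int) < 5),
      PySem.Int.floordiv_eq_ediv_of_pos (by positivity : (0:Int) < 5 ^ i),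
      PySem.Int.floordiv_eq_ediv_of_pos (by positivity : (0:Int) < 5 ^ (i + 1)),
      Int.ediv_ediv_of_nonneg (by norm_num : (0:Int) ≤ 5)]
  rw [show (5:Int) * 5 ^ i = 5 ^ (i + 1) by rw [pow_succ]; ring]

lemma fd_one (l : Int) : PySem.Int.floordiv l ((5:Int) ^ 0) = l := by
  rw [pow_zero, PySem.Int.floordiv_eq_ediv_of_pos (by norm_num : (0:Int) < 1), Int.ediv_one]

-- A returns False as soon as the consulted cell at scale l // 5^i is empty
lemma zeroA (i : Nat) : ∀ (x y l : Int), 2 * (5:Int) ^ i ≤ l →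
    starAt (PySem.Int.mod (PySem.Int.floordiv y (PySem.Int.floordiv l (5 ^ i))) 5)
           (PySem.Int.mod (PySem.Int.floordiv x (PySem.Int.floordiv l (5 ^ i))) 5) = 0 →
    is_star_or_space x y l = false := by
  induction i with
  | zero =>
    intro x y l hl h0
    rw [fd_one] at h0
    have hl2 : (2:Int) ≤ l := by simpa using hl
    rw [is_star_or_space]
    have hne : (l == 1) = false := by simp; omega
    simp only [PySem.Int.mod_eq_emod_of_pos (by norm_num : (0:Int) < 5)] at h0
    simp [hne, h0]
  | succ i ih =>
    intro x y l hl h0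
    have h10 : (10:Int) ≤ l := le_trans (by
      have h1 : (1:Int) ≤ 5 ^ i := one_le_pow₀ (by norm_num)
      nlinarith [show 2 * (5:Int) ^ (i + 1) = 10 * 5 ^ i from by ring]) hl
    rw [is_star_or_space]
    have hne : (l == 1) = false := by simp; omega
    rw [dif_neg (by omega : ¬ l ≤ 0)]
    have hb : 2 * (5:Int) ^ i ≤ PySem.Int.floordiv l 5 := by
      rw [PySem.Int.le_floordiv_iff_mul_le (by norm_num : (0:Int) < 5)]
      calc 2 * (5:Int) ^ i * 5 = 2 * 5 ^ (i + 1) := by ring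
        _ ≤ l := hl
    have h0' := h0
    rw [← fd_comp] at h0'
    have hIH := ih x y (PySem.Int.floordiv l 5) hb h0'
    rw [PySem.Int.floordiv_eq_ediv_of_pos (by norm_num : (0:Int) < 5)] at hIH
    rcases starMod (PySem.Int.floordiv y l) (PySem.Int.floordiv x l) with h | h <;>
      simp only [PySem.Int.mod_eq_emod_of_pos (by norm_num : (0:Int) < 5)] at h <;>
      simp [hne, h, hIH]

-- the accumulator is a prefix of buildScales' result
lemma buildScales_acc_sub (l : Int) (acc : List Int) :
    ∀ a ∈ acc, a ∈ (buildScales l acc).1 := by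
  induction l, acc using buildScales.induct with
  | case1 l acc h ih =>
    intro a ha
    rw [buildScales, dif_pos h]
    exact ih a (by simp [ha])
  | case2 l acc h =>
    intro a ha
    rw [buildScales, dif_neg h]
    exact ha

-- every scale l // 5^i that is still ≥ 2 appears in B's collected scales
lemma mem_buildScales (i : Nat) : ∀ (l : Int) (acc : List Int), 2 * (5:Int) ^ i ≤ l →
    PySem.Int.floordiv l (5 ^ i) ∈ (buildScales l acc).1 := by
  induction i with
  | zero =>
    intro l acc hl
    have hl2 : (2:Int) ≤ l := by simpa using hl
    rw [fd_one, buildScales, dif_pos (by omega : (1:Int) < l)]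
    exact buildScales_acc_sub _ _ l (by simp)
  | succ i ih =>
    intro l acc hl
    have h10 : (10:Int) ≤ l := le_trans (by
      have h1 : (1:Int) ≤ 5 ^ i := one_le_pow₀ (by norm_num)
      nlinarith [show 2 * (5:Int) ^ (i + 1) = 10 * 5 ^ i from by ring]) hl
    have hb : 2 * (5:Int) ^ i ≤ PySem.Int.floordiv l 5 := by
      rw [PySem.Int.le_floordiv_iff_mul_le (by norm_num : (0:Int) < 5)]
      calc 2 * (5:Int) ^ i * 5 = 2 * 5 ^ (i + 1) := by ring
        _ ≤ l := hl
    rw [← fd_comp, buildScales, dif_pos (by omega : (1:Int) < l)]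
    exact ih _ _ hb

-- B returns False when the cell at a collected scale is empty
lemma zeroB (x y l : Int) (i : Nat) (hl : 2 * (5:Int) ^ i ≤ l)
    (h0 : starAt (PySem.Int.mod (PySem.Int.floordiv y (PySem.Int.floordiv l (5 ^ i))) 5)
                 (PySem.Int.mod (PySem.Int.floordiv x (PySem.Int.floordiv l (5 ^ i))) 5) = 0) :
    is_star_or_space_alt x y l = false := by
  have hmem := mem_buildScales i l [] hl
  have hcell : cellB x y (PySem.Int.floordiv l (5 ^ i)) = false := by
    simp only [cellB, h0]; rfl
  unfold is_star_or_space_alt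
  rcases hb : buildScales l [] with ⟨scales, lf⟩
  rw [hb] at hmem
  simp only at hmem
  have hfalse : ∀ ds : List Int, PySem.Int.floordiv l (5 ^ i) ∈ ds →
      checkScales x y ds.reverse = false := by
    intro ds hds
    rw [checkScales_all, List.all_reverse]
    exact List.all_eq_false.mpr ⟨_, hds, by rw [hcell]; decide⟩
  cases hlf : (lf == 1)
  · simpa [hlf] using hfalse scales hmem
  · simpa [hlf] using hfalse (scales ++ [1]) (List.mem_append_left _ hmem)

-- for l ≥ 1, 5^⌊log₅ l⌋ ≤ l (the lower half of the leading-digit bracket)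
lemma pow_log_le (l : Int) (hl : 1 ≤ l) : (5:Int) ^ Nat.log 5 l.toNat ≤ l := by
  have h := Nat.pow_log_le_self 5 (x := l.toNat) (by omega)
  have : ((5:Nat) ^ Nat.log 5 l.toNat : Int) ≤ (l.toNat : Int) := Int.ofNat_le.mpr h
  push_cast at this
  omega

-- ===== VERDICT (by name: the statement is the Claim_ definition above) =====
theorem is_star_or_space_spec : Claim_equal_is_star_or_space := by
  intro x y l _ hpre
  unfold Spec_is_star_or_space
  rcases hpre with ⟨hl1, h2⟩ | ⟨_, i, _, hle, hmem⟩
  · have h1 := pow_log_le l hl1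
    unfold is_star_or_space_alt
    rw [buildScales_char (Nat.log 5 l.toNat) l [] h1 h2]
    simp only [List.nil_append, beq_self_eq_true, if_true]
    rw [checkScales_all, List.all_reverse, A_char (Nat.log 5 l.toNat) x y l h1 h2]
  · have h0 := zeroCells_starAt _ hmem
    rw [zeroA i x y l hle h0, zeroB x y l i hle h0]
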